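/- GENERATED by farm/mkstatement.py from design/units.tsv (unit `DGifGetLine.P`) and the assertions of Gif/Spec/Seg_DGifGetLine.lean — do not edit.
   THE STATEMENT of the proof unit `DGifGetLine.P`: segment P of `DGifGetLine` (17 instructions; entries 0x10a1e0;
   exits 0x10a230; ranges 0x10a1e0-0x10a230)
   takes each of its entry assertions to one of its exit assertions (`Gif.Spec.DGifGetLine.SegP`), given the contracts of its callees.
   What the names mean: ProgX/Base/Spec/Basic.lean (the shared hypotheses), Gif/Spec/Seg_DGifGetLine.lean (the assertions). The theorem to prove:
   `theorem DGifGetLine_P_ok : Gif.Spec.DGifGetLine_P.Statement`. -/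
import Gif.Code
import Gif.Dec.All
import Gif.Labels
import Gif.Spec.Seg_DGifGetLine
namespace Gif.Spec.DGifGetLine_P
open X86 X86.User Asan

/-- The statement of unit `DGifGetLine.P`. -/
def Statement : Prop :=
  ∀ (Lay : Layout) (_hLay : Lay.hi = 0x1000000) (μ : Microarch) (_hμ : UserX.MicroOK μ) (u₀ : State)
    (_hcode : HasCodeNat Lay u₀ Gif.L.DGifGetLine.entry Gif.Code.code_DGifGetLine.nat Gif.L.DGifGetLine.size),
    Gif.Spec.DGifGetLine.SegP Lay μ u₀

end Gif.Spec.DGifGetLine_P
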